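-- pv_equiv track=rewrite | github.com/ziwei-75/aquila_bring_back | script/concat_new_assembly_with_original_aquila.py | adjust_clipping
-- ===== SOURCE A (Python) =====
-- def adjust_clipping(cigar,concat_index):
--     clipping = 0
--     current_index = 0
--     for operation,length in cigar:
--         if operation == 4 or operation == 5:
--             clipping += length
--         current_index += length
--         if current_index >= concat_index:
--             return clipping
-- ===== SOURCE B (Python) =====
-- def adjust_clipping(cigar, concat_index):
--     # First pass: find the index of the operation at which the cumulative
--     # length first reaches concat_index; second pass: sum clipping lengths
--     # (ops 4/5) over the prefix up to and including that operation.
--     total = 0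
--     break_i = None
--     for i, (op, length) in enumerate(cigar):
--         total += length
--         if total >= concat_index:
--             break_i = i
--             break
--     if break_i is None:
--         return None
--     return sum(length for op, length in cigar[:break_i + 1] if op in (4, 5))
-- ===== Notes on version B (the rewrite author's own statement) =====
-- stated objective: alternative
-- what changed: A fuses break-detection and clipping accumulation in one stateful loop; B first finds the break index by accumulating lengths only, then sums clipping lengths over the inclusive prefix in a separate filtered pass.
import Mathlib
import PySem

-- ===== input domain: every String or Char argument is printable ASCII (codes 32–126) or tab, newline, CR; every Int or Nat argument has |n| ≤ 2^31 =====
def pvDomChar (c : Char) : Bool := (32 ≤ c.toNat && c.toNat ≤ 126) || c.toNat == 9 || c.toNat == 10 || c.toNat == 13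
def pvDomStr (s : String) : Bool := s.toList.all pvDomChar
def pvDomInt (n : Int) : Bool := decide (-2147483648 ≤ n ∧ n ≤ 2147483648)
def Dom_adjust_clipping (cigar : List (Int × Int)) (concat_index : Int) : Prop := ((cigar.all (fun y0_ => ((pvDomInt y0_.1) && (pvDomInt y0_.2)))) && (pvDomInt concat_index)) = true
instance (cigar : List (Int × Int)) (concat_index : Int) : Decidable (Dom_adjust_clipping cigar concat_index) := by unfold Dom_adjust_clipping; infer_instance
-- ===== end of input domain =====

-- B replaces A's fused stateful loop by two passes: find the break index by accumulating lengths, then sum clipping lengths (ops 4/5) over the inclusive prefix (objective: alternative decomposition, not faster).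


-- ===== PORT A =====
-- Loop of A: state (clipping, current_index); returns at the first op where
-- current_index reaches concat_index, falls through to None otherwise.
def adjust_clipping_go (cigar : List (Int × Int)) (clipping current concat_index : Int) : Option Int :=
  match cigar with
  | [] => none
  | (op, len) :: rest =>
    let clipping := if op == 4 || op == 5 then clipping + len else clipping
    let current := current + len
    if concat_index ≤ current then some clipping
    else adjust_clipping_go rest clipping current concat_index

def adjust_clipping (cigar : List (Int × Int)) (concat_index : Int) : Option Int :=
  adjust_clipping_go cigar 0 0 concat_index

-- ===== PORT B =====
-- B pass 1: index of the first operation where cumulative length reaches concat_index.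
def findBreak (cigar : List (Int × Int)) (total concat_index : Int) (i : Nat) : Option Nat :=
  match cigar with
  | [] => none
  | (_, len) :: rest =>
    let total := total + len
    if concat_index ≤ total then some i else findBreak rest total concat_index (i + 1)

-- B pass 2: sum of lengths of clipping operations (4/5).
def clipSum (xs : List (Int × Int)) : Int :=
  ((xs.filter (fun p => p.1 == 4 || p.1 == 5)).map Prod.snd).sum

def adjust_clipping_alt (cigar : List (Int × Int)) (concat_index : Int) : Option Int :=
  match findBreak cigar 0 concat_index 0 with
  | none => none
  | some i => some (clipSum (cigar.take (i + 1)))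

-- ===== PRECONDITION & SPEC =====
def Spec_adjust_clipping (cigar : List (Int × Int)) (concat_index : Int) (out : Option Int) : Prop := out = adjust_clipping_alt cigar concat_index
instance (cigar : List (Int × Int)) (concat_index : Int) (out : Option Int) : Decidable (Spec_adjust_clipping cigar concat_index out) := by unfold Spec_adjust_clipping; infer_instance

-- ===== CLAIM (what is proved, stated in full; the proofs are below) =====
def Claim_equal_adjust_clipping : Prop := ∀ (cigar : List (Int × Int)) (concat_index : Int), Dom_adjust_clipping cigar concat_index → Spec_adjust_clipping cigar concat_index (adjust_clipping cigar concat_index)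

-- ===== LEMMAS AND PROOFS =====

theorem findBreak_shift (cigar : List (Int × Int)) (total concat_index : Int) (i : Nat) :
    findBreak cigar total concat_index i = (findBreak cigar total concat_index 0).map (· + i) := by
  induction cigar generalizing total i with
  | nil => simp [findBreak]
  | cons hd tl ih =>
    obtain ⟨op, len⟩ := hd
    simp only [findBreak]
    split_ifs with h
    · simp
    · rw [ih, ih (i := 1)]
      cases findBreak tl (total + len) concat_index 0 <;> simp <;> omega

theorem clipSum_cons (op len : Int) (xs : List (Int × Int)) :
    clipSum ((op, len) :: xs) = (if op == 4 || op == 5 then len else 0) + clipSum xs := by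
  simp only [clipSum, List.filter_cons]
  split_ifs with h <;> simp [h]

theorem go_eq (cigar : List (Int × Int)) (c cur concat_index : Int) :
    adjust_clipping_go cigar c cur concat_index =
      (findBreak cigar cur concat_index 0).map (fun i => c + clipSum (cigar.take (i + 1))) := by
  induction cigar generalizing c cur with
  | nil => simp [adjust_clipping_go, findBreak]
  | cons hd tl ih =>
    obtain ⟨op, len⟩ := hd
    simp only [adjust_clipping_go, findBreak]
    by_cases h : concat_index ≤ cur + len
    · simp only [h, if_true, List.take_succ_cons, List.take_zero, clipSum_cons, clipSum]
      by_cases h2 : (op == 4 || op == 5) = true <;> simp [h2]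
    · simp only [h, if_false, Nat.zero_add]
      rw [ih, findBreak_shift tl (cur + len) concat_index 1, Option.map_map]
      cases findBreak tl (cur + len) concat_index 0 with
      | none => rfl
      | some i =>
        simp only [Option.map_some, Function.comp_apply]
        rw [List.take_succ_cons, clipSum_cons]
        by_cases h2 : (op == 4 || op == 5) = true <;> simp [h2] <;> ring

-- ===== VERDICT (by name: the statement is the Claim_ definition above) =====
theorem adjust_clipping_spec : Claim_equal_adjust_clipping := by
  intro cigar concat_index _
  unfold Spec_adjust_clipping adjust_clipping adjust_clipping_alt
  rw [go_eq]
  cases findBreak cigar 0 concat_index 0 <;> simp
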